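-- pv_equiv track=rewrite | github.com/thisiskorea/euragovqa.github.io | experiment/prompt_routing_experiment.py | extract_answer
-- ===== SOURCE A (Python) =====
-- def extract_answer(response: str) -> str:
--     """Extract the answer letter/number from response."""
--     if not response:
--         return ""
--     response = response.upper().strip()
--     for char in response:
--         if char in "ABCDE12345":
--             return char
--     return response[:1] if response else ""
-- ===== SOURCE B (Python) =====
-- def extract_answer(response: str) -> str:
--     """Extract the answer letter/number from response."""
--     if not response:
--         return ""
--     response = response.upper().strip()
--     hits = [i for i in (response.find(c) for c in "ABCDE12345") if i != -1]
--     if hits: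
--         return response[min(hits)]
--     return response[:1] if response else ""
-- ===== Notes on version B (the rewrite author's own statement) =====
-- stated objective: alternative
-- what changed: Replaces A's single per-character scan testing membership in "ABCDE12345" with ten str.find scans (one per answer symbol) whose non-missing indices are collected and minimised, indexing the string at the minimum.
import Mathlib
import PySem

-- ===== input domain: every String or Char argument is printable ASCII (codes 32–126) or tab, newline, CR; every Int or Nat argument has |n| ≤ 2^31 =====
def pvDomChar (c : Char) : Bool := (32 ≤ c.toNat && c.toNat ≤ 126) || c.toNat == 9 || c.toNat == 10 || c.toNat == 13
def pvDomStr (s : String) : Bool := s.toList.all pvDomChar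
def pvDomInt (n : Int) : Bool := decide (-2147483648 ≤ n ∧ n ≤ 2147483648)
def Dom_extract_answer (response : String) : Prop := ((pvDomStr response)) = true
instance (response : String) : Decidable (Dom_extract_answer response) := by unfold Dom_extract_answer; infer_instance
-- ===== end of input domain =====

-- B replaces A's per-character membership scan by ten find scans (one per answer
-- symbol) whose found indices are collected and minimised (objective: alternative).

-- ===== PORT A =====
-- the answer alphabet "ABCDE12345"
def pvSA : List Char := "ABCDE12345".toList

-- the 'for char in response: if char in "ABCDE12345": return char' loop
def pvLoopA : List Char → Option Char
  | [] => none
  | c :: rest => if PySem.Chars.isIn [c] pvSA then some c else pvLoopA rest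

def extract_answer (response : String) : String :=
  if response = "" then ""
  else
    let r := PySem.Str.strip (PySem.Str.upper response)
    match pvLoopA r.toList with
    | some c => String.mk [c]
    | none => if r ≠ "" then PySem.Str.slice r none (some 1) else ""

-- ===== PORT B =====
-- [i for i in (r.find(c) for c in "ABCDE12345") if i != -1]
def pvHits (l : List Char) : List Int :=
  (("ABCDE12345".toList).map (fun c => PySem.Chars.find l [c])).filter (fun i => i != -1)

def extract_answer_alt (response : String) : String :=
  if response = "" then ""
  else
    let r := PySem.Str.strip (PySem.Str.upper response)
    match PySem.List.min? (pvHits r.toList) (fun x => x) with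
    | some m =>
        match PySem.List.pyGet? r.toList m with
        | some c => String.mk [c]
        | none => ""   -- IndexError; unreachable: the minimum hit is a valid index
    | none => if r ≠ "" then PySem.Str.slice r none (some 1) else ""

-- ===== PRECONDITION & SPEC =====
def Spec_extract_answer (response : String) (out : String) : Prop := out = extract_answer_alt response
instance (response : String) (out : String) : Decidable (Spec_extract_answer response out) := by unfold Spec_extract_answer; infer_instance

-- ===== CLAIM (what is proved, stated in full; the proofs are below) =====
def Claim_equal_extract_answer : Prop := ∀ (response : String), Dom_extract_answer response → Spec_extract_answer response (extract_answer response)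

-- ===== LEMMAS AND PROOFS =====

theorem pv_singleton_infix_iff (c : Char) (l : List Char) : [c] <:+: l ↔ c ∈ l := by
  constructor
  · intro h; exact h.subset (List.mem_singleton_self c)
  · intro h
    obtain ⟨s, t, rfl⟩ := List.append_of_mem h
    exact ⟨s, t, by simp⟩

theorem pv_loopA_eq_find? (l : List Char) :
    pvLoopA l = l.find? (fun c => decide (c ∈ pvSA)) := by
  induction l with
  | nil => rfl
  | cons x t ih =>
    by_cases hx : x ∈ pvSA
    · have : PySem.Chars.isIn [x] pvSA = true :=
        (PySem.Chars.isIn_iff_infix _ _).mpr ((pv_singleton_infix_iff x pvSA).mpr hx)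
      simp [pvLoopA, this, List.find?_cons, hx]
    · have : PySem.Chars.isIn [x] pvSA = false :=
        (PySem.Chars.isIn_eq_false_iff _ _).mpr
          (fun h => hx ((pv_singleton_infix_iff x pvSA).mp h))
      simp [pvLoopA, this, List.find?_cons, hx, ih]

theorem pv_find_eq_of_spec (l sub : List Char) (n : Nat)
    (h1 : sub <+: l.drop n) (h2 : ∀ i < n, ¬ sub <+: l.drop i) :
    PySem.Chars.find l sub = n := by
  have hin : PySem.Chars.isIn sub l = true :=
    (PySem.Chars.exists_prefix_drop_iff_isIn sub l).mp ⟨n, h1⟩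
  have hnn : 0 ≤ PySem.Chars.find l sub :=
    (PySem.Chars.find_nonneg_iff l sub).mpr ((PySem.Chars.isIn_iff_infix sub l).mp hin)
  obtain ⟨hp, hmin⟩ := PySem.Chars.find_spec hnn
  rcases Nat.lt_trichotomy (PySem.Chars.find l sub).toNat n with h | h | h
  · exact absurd hp (h2 _ h)
  · omega
  · exact absurd h1 (hmin n h)

theorem pv_find_singleton_cons (c x : Char) (t : List Char) :
    PySem.Chars.find (x :: t) [c] =
      if c = x then 0
      else if PySem.Chars.find t [c] = -1 then -1 else PySem.Chars.find t [c] + 1 := by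
  by_cases hcx : c = x
  · subst hcx
    simp only [if_pos rfl]
    exact pv_find_eq_of_spec (c :: t) [c] 0 (by simp) (by omega)
  · simp only [if_neg hcx]
    by_cases hmiss : PySem.Chars.find t [c] = -1
    · simp only [if_pos hmiss]
      apply (PySem.Chars.find_eq_neg_one_iff _ _).mpr
      intro h
      have hmem : c ∈ x :: t := (pv_singleton_infix_iff c (x :: t)).mp h
      rcases List.mem_cons.mp hmem with rfl | hmem
      · exact hcx rfl
      · exact ((PySem.Chars.find_eq_neg_one_iff t [c]).mp hmiss)
          ((pv_singleton_infix_iff c t).mpr hmem)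
    · simp only [if_neg hmiss]
      have hnn : 0 ≤ PySem.Chars.find t [c] := by
        have := PySem.Chars.neg_one_le_find t [c]; omega
      obtain ⟨hp, hmin⟩ := PySem.Chars.find_spec hnn
      have := pv_find_eq_of_spec (x :: t) [c] ((PySem.Chars.find t [c]).toNat + 1)
        (by simpa using hp)
        (by
          intro i hi
          match i with
          | 0 =>
            intro hpre
            exact hcx (by
              rcases hpre with ⟨tl, htl⟩
              simpa using congrArg (·.head?) htl)
          | j + 1 =>
            have hj : j < (PySem.Chars.find t [c]).toNat := by omega
            simpa using hmin j hj)
      rw [this]; omega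

theorem pv_mem_hits_nonneg (l : List Char) : ∀ y ∈ pvHits l, 0 ≤ y := by
  intro y hy
  unfold pvHits at hy
  obtain ⟨hy1, hy2⟩ := List.mem_filter.mp hy
  obtain ⟨c, _, rfl⟩ := List.mem_map.mp hy1
  have := PySem.Chars.neg_one_le_find l [c]
  simp only [bne_iff_ne, ne_eq, decide_eq_true_eq] at hy2
  omega

-- filter (≠ -1) after the shift step equals shifting the filtered list
theorem pv_filter_step (zs : List Int) (hz : ∀ z ∈ zs, -1 ≤ z) :
    (zs.map (fun z => if z = -1 then (-1 : Int) else z + 1)).filter (fun i => i != -1)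
      = (zs.filter (fun i => i != -1)).map (· + 1) := by
  induction zs with
  | nil => rfl
  | cons z zs' ih =>
    have hz0 := hz z (List.mem_cons_self)
    have ih' := ih (fun z hzm => hz z (List.mem_cons_of_mem _ hzm))
    by_cases h : z = -1
    · simp [h, ih']
    · have : z + 1 ≠ -1 := by omega
      simp [h, this, ih']

theorem pv_min?_map_succ (xs : List Int) :
    PySem.List.min? (xs.map (· + 1)) (fun x => x)
      = (PySem.List.min? xs (fun x => x)).map (· + 1) := by
  cases xs with
  | nil => rfl
  | cons x t =>
    simp only [List.map_cons, PySem.List.min?_id_cons, Option.map_some]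
    congr 1
    induction t generalizing x with
    | nil => rfl
    | cons a t' ih =>
      simp only [List.map_cons, List.foldl_cons]
      rw [min_add_add_right x a 1]
      exact ih (min x a)

theorem pv_hits_cons_not_mem (x : Char) (t : List Char) (hx : x ∉ pvSA) :
    pvHits (x :: t) = (pvHits t).map (· + 1) := by
  unfold pvHits
  have hmap : ("ABCDE12345".toList).map (fun c => PySem.Chars.find (x :: t) [c])
      = ("ABCDE12345".toList).map
          (fun c => if PySem.Chars.find t [c] = -1 then (-1 : Int)
                    else PySem.Chars.find t [c] + 1) := by
    apply List.map_congr_left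
    intro c hc
    rw [pv_find_singleton_cons]
    have : c ≠ x := fun h => hx (h ▸ hc)
    simp [this]
  rw [hmap]
  have hstep := pv_filter_step (("ABCDE12345".toList).map (fun c => PySem.Chars.find t [c]))
    (by
      intro z hz
      obtain ⟨c, _, rfl⟩ := List.mem_map.mp hz
      exact PySem.Chars.neg_one_le_find t [c])
  simpa [List.map_map, Function.comp] using hstep

theorem pv_zero_mem_hits (x : Char) (t : List Char) (hx : x ∈ pvSA) :
    (0 : Int) ∈ pvHits (x :: t) := by
  unfold pvHits
  apply List.mem_filter.mpr
  constructor
  · apply List.mem_map.mpr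
    refine ⟨x, hx, ?_⟩
    rw [pv_find_singleton_cons]; simp
  · decide

-- the core: B's min-of-found-indices selection returns exactly A's first matching char
theorem pv_core (l : List Char) :
    (match PySem.List.min? (pvHits l) (fun x => x) with
     | some m => PySem.List.pyGet? l m
     | none => none)
      = l.find? (fun c => decide (c ∈ pvSA)) := by
  induction l with
  | nil => decide
  | cons x t ih =>
    by_cases hx : x ∈ pvSA
    · -- the head matches: 0 is a hit, so the minimum is 0 and l[0] = x
      have h0 : (0 : Int) ∈ pvHits (x :: t) := pv_zero_mem_hits x t hx
      have hne : pvHits (x :: t) ≠ [] := by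
        intro h; rw [h] at h0; exact absurd h0 (List.not_mem_nil)
      obtain ⟨m, hm⟩ : ∃ m, PySem.List.min? (pvHits (x :: t)) (fun x => x) = some m := by
        cases hmin : PySem.List.min? (pvHits (x :: t)) (fun x => x) with
        | none =>
          exact absurd (by rwa [PySem.List.min?_eq_none_iff] at hmin) hne
        | some m => exact ⟨m, rfl⟩
      have hm0 : m = 0 := by
        have h1 : 0 ≤ m := pv_mem_hits_nonneg _ m (PySem.List.min?_mem hm)
        have h2 : m ≤ 0 := PySem.List.min?_isMin hm 0 h0
        omega
      subst hm0
      rw [hm]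
      simp [PySem.List.pyGet?_zero_cons, List.find?_cons, hx]
    · -- head does not match: everything shifts by one
      rw [pv_hits_cons_not_mem x t hx, pv_min?_map_succ]
      cases hmin : PySem.List.min? (pvHits t) (fun x => x) with
      | none =>
        simp only [hmin, Option.map_none]
        have := ih; rw [hmin] at this
        simp only at this
        simp [List.find?_cons, hx, ← this]
      | some m =>
        simp only [hmin, Option.map_some]
        have hmn : 0 ≤ m := pv_mem_hits_nonneg t m (PySem.List.min?_mem hmin)
        have := ih; rw [hmin] at this
        simp only at this
        have hget : PySem.List.pyGet? (x :: t) (m + 1) = PySem.List.pyGet? t m := by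
          have hm' : m = ((m.toNat : Nat) : Int) := by omega
          rw [hm', PySem.List.pyGet?_cons_succ]
        rw [hget, this]
        simp [List.find?_cons, hx]

-- ===== VERDICT (by name: the statement is the Claim_ definition above) =====
theorem extract_answer_spec : Claim_equal_extract_answer := by
  intro response _
  unfold Spec_extract_answer extract_answer extract_answer_alt
  by_cases hresp : response = ""
  · simp [hresp]
  · simp only [if_neg hresp]
    set r := PySem.Str.strip (PySem.Str.upper response) with hr
    have hcore := pv_core r.toList
    rw [pv_loopA_eq_find?]
    cases hfind : r.toList.find? (fun c => decide (c ∈ pvSA)) with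
    | none =>
      rw [hfind] at hcore
      cases hmin : PySem.List.min? (pvHits r.toList) (fun x => x) with
      | none => rfl
      | some m =>
        -- impossible: a hit means some answer char occurs, so find? succeeds
        exfalso
        have hmem := PySem.List.min?_mem hmin
        unfold pvHits at hmem
        obtain ⟨h1, h2⟩ := List.mem_filter.mp hmem
        obtain ⟨c, hc, hcf⟩ := List.mem_map.mp h1
        simp only [bne_iff_ne, ne_eq, decide_eq_true_eq] at h2
        rw [← hcf] at h2
        have hinf : [c] <:+: r.toList := (PySem.Chars.find_ne_neg_one_iff _ _).mp h2
        have hcl : c ∈ r.toList := (pv_singleton_infix_iff c r.toList).mp hinf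
        have := List.find?_eq_none.mp hfind c hcl
        simp only [decide_eq_true_eq] at this
        exact this hc
    | some c =>
      rw [hfind] at hcore
      cases hmin : PySem.List.min? (pvHits r.toList) (fun x => x) with
      | none => rw [hmin] at hcore; simp at hcore
      | some m =>
        rw [hmin] at hcore
        simp only at hcore
        simp [hcore]
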